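-- pv_equiv track=rewrite | github.com/sirfifer/agent-vision-team | scripts/hooks/audit/prompts.py | match_directives
-- ===== SOURCE A (Python) =====
-- def match_directives(anomalies: list[dict], directives: list[dict]) -> list[dict]:
--     """Find directives relevant to the given anomalies.
--
--     Matches based on the anomaly type against directive watch patterns.
--     """
--     if not directives:
--         return []
--
--     anomaly_types = {a.get("type", "") for a in anomalies}
--     matched = []
--
--     for directive in directives:
--         watches = directive.get("watches", [])
--         for watch in watches:
--             if watch == "*":
--                 matched.append(directive)
--                 break
--             # Simple glob matching: trailing wildcard matches prefix
--             if watch.endswith("*"):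
--                 # e.g. "governance.*" -> "governance."
--                 prefix = watch[:-1]
--                 if any(at.startswith(prefix) for at in anomaly_types):
--                     matched.append(directive)
--                     break
--             elif watch in anomaly_types:
--                 matched.append(directive)
--                 break
--
--     return matched
-- ===== SOURCE B (Python) =====
-- def match_directives(anomalies: list[dict], directives: list[dict]) -> list[dict]:
--     """Find directives relevant to the given anomalies.
--
--     Precomputes the set of all prefixes of the anomaly types once; each
--     trailing-wildcard watch is then a single set-membership test.
--     """
--     anomaly_types = {a.get("type", "") for a in anomalies}
--     prefixes = {t[:i] for t in anomaly_types for i in range(len(t) + 1)}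
--
--     def relevant(watch: str) -> bool:
--         if watch.endswith("*"):
--             return watch == "*" or watch[:-1] in prefixes
--         return watch in anomaly_types
--
--     return [d for d in directives
--             if any(relevant(w) for w in d.get("watches", []))]
-- ===== Notes on version B (the rewrite author's own statement) =====
-- stated objective: alternative
-- what changed: Instead of scanning all anomaly types for every trailing-wildcard watch, B builds the set of all prefixes of the anomaly types once and answers each wildcard watch by a single set-membership test, filtering directives with a comprehension.
import Mathlib
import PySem

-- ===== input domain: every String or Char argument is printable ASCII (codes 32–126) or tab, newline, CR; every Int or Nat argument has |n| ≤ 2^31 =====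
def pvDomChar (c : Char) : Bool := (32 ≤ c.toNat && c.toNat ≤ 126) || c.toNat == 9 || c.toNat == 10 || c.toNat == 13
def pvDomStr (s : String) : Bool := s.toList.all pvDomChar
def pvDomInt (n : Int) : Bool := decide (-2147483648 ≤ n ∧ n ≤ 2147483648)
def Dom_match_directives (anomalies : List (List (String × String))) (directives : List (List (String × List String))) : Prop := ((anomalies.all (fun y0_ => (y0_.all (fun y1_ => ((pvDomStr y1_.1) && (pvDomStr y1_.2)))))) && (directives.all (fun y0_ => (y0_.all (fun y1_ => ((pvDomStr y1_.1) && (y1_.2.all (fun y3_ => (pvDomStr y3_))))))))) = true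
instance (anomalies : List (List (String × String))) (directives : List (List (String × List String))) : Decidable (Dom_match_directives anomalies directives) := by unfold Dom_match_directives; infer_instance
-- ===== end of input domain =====

-- B replaces A's per-watch scan over all anomaly types with a membership test in a prefix set built once; objective: alternative.

-- ===== PORT A =====
-- shared helper: Python's d.get(k, default) on an association list (first match)
def pvGetD {ν : Type} (d : List (String × ν)) (k : String) (dflt : ν) : ν :=
  match d.find? (fun p => p.1 == k) with
  | some p => p.2
  | none => dflt

-- A's inner 'for watch in watches: … break' loop: true iff some watch matches (the break)
def pvWatchLoopA (types : PySem.Set String) : List String → Bool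
  | [] => false
  | w :: ws =>
    if w = "*" then true
    else if PySem.Str.endswith w "*" then
      if types.any (fun at_ => PySem.Str.startswith at_ (PySem.Str.slice w none (some (-1)))) then true
      else pvWatchLoopA types ws
    else if PySem.Set.contains types w then true
    else pvWatchLoopA types ws

def match_directives (anomalies : List (List (String × String))) (directives : List (List (String × List String))) : List (List (String × List String)) :=
  if directives = [] then []
  else
    let anomaly_types : PySem.Set String := PySem.Set.ofList (anomalies.map (fun a => pvGetD a "type" ""))
    directives.foldl (fun matched directive =>
      if pvWatchLoopA anomaly_types (pvGetD directive "watches" []) then matched ++ [directive]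
      else matched) []

-- ===== PORT B =====
-- Source B: all prefixes t[:i], i in range(len(t)+1)
def pvPrefixes (t : String) : List String :=
  (PySem.List.pyRange 0 ((PySem.Str.len t : Int) + 1) 1).map (fun i => PySem.Str.slice t none (some i))

-- Source B's 'relevant(watch)' predicate
def pvRelevantB (types prefixes : PySem.Set String) (w : String) : Bool :=
  if PySem.Str.endswith w "*" then
    w == "*" || PySem.Set.contains prefixes (PySem.Str.slice w none (some (-1)))
  else PySem.Set.contains types w

def match_directives_alt (anomalies : List (List (String × String))) (directives : List (List (String × List String))) : List (List (String × List String)) :=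
  let anomaly_types : PySem.Set String := PySem.Set.ofList (anomalies.map (fun a => pvGetD a "type" ""))
  let prefixes : PySem.Set String := PySem.Set.ofList (anomaly_types.flatMap pvPrefixes)
  directives.filter (fun d =>
    (pvGetD d "watches" []).any (pvRelevantB anomaly_types prefixes))

-- ===== PRECONDITION & SPEC =====
def Spec_match_directives (anomalies : List (List (String × String))) (directives : List (List (String × List String))) (out : List (List (String × List String))) : Prop := out = match_directives_alt anomalies directives
instance (anomalies : List (List (String × String))) (directives : List (List (String × List String))) (out : List (List (String × List String))) : Decidable (Spec_match_directives anomalies directives out) := by unfold Spec_match_directives; infer_instance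

-- ===== CLAIM (what is proved, stated in full; the proofs are below) =====
def Claim_equal_match_directives : Prop := ∀ (anomalies : List (List (String × String))) (directives : List (List (String × List String))), Dom_match_directives anomalies directives → Spec_match_directives anomalies directives (match_directives anomalies directives)

-- ===== LEMMAS AND PROOFS =====

-- membership in pvPrefixes t is exactly "p is a prefix of t"
theorem mem_pvPrefixes_iff (t p : String) :
    p ∈ pvPrefixes t ↔ PySem.Str.startswith t p = true := by
  simp only [pvPrefixes, List.mem_map, PySem.List.mem_pyRange_one]
  constructor
  · rintro ⟨i, ⟨h0, hi⟩, rfl⟩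
    simp only [PySem.Str.startswith_eq, PySem.Chars.startswith_iff]
    have : (PySem.Str.slice t none (some i)).toList = t.toList.take i.toNat := by
      simp [PySem.List.slice_to _ h0]
    rw [this]
    exact List.take_prefix _ _
  · intro h
    refine ⟨(p.toList.length : Int), ⟨by positivity, ?_⟩, ?_⟩
    · have hle : p.toList.length ≤ t.toList.length := by
        simp only [PySem.Str.startswith_eq, PySem.Chars.startswith_iff] at h
        exact h.length_le
      have : PySem.Str.len t = t.toList.length := by simp
      omega
    · apply String.toList_inj.mp
      have : (PySem.Str.slice t none (some (p.toList.length : Int))).toList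
          = t.toList.take p.toList.length := by
        simp
      rw [this]
      simp only [PySem.Str.startswith_eq, PySem.Chars.startswith_iff] at h
      exact (List.prefix_iff_eq_take.mp h).symm

-- prefix-set membership = scan with startswith
theorem contains_prefixes_eq (types : PySem.Set String) (p : String) :
    PySem.Set.contains (PySem.Set.ofList (types.flatMap pvPrefixes)) p
      = types.any (fun at_ => PySem.Str.startswith at_ p) := by
  rw [Bool.eq_iff_iff]
  simp [PySem.Set.mem_ofList, List.mem_flatMap, List.any_eq_true, mem_pvPrefixes_iff]

-- A's inner loop computes B's any-of-relevant
theorem watchLoopA_eq_any (types : PySem.Set String) (ws : List String) :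
    pvWatchLoopA types ws
      = ws.any (pvRelevantB types (PySem.Set.ofList (types.flatMap pvPrefixes))) := by
  induction ws with
  | nil => rfl
  | cons w ws ih =>
    simp only [List.any_cons, pvWatchLoopA]
    by_cases h1 : w = "*"
    · rw [if_pos h1, h1]
      have h2 : pvRelevantB types (PySem.Set.ofList (types.flatMap pvPrefixes)) "*" = true := by
        simp only [pvRelevantB]
        rw [if_pos (by decide)]
        simp
      rw [h2, Bool.true_or]
    · rw [if_neg h1]
      by_cases h2 : PySem.Str.endswith w "*" = true
      · rw [if_pos h2]
        have hrel : pvRelevantB types (PySem.Set.ofList (types.flatMap pvPrefixes)) w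
            = types.any (fun at_ => PySem.Str.startswith at_ (PySem.Str.slice w none (some (-1)))) := by
          simp only [pvRelevantB]
          rw [if_pos h2, contains_prefixes_eq]
          simp [h1]
        rw [hrel]
        cases hA : types.any (fun at_ => PySem.Str.startswith at_ (PySem.Str.slice w none (some (-1))))
        · rw [if_neg (by simp), ih, Bool.false_or]
        · simp
      · rw [if_neg h2]
        have hrel : pvRelevantB types (PySem.Set.ofList (types.flatMap pvPrefixes)) w
            = PySem.Set.contains types w := by
          simp only [pvRelevantB]
          rw [if_neg h2]
        rw [hrel]
        cases hC : PySem.Set.contains types w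
        · rw [if_neg (by simp), ih, Bool.false_or]
        · simp

-- ===== VERDICT (by name: the statement is the Claim_ definition above) =====
theorem match_directives_spec : Claim_equal_match_directives := by
  intro anomalies directives _
  unfold Spec_match_directives match_directives match_directives_alt
  by_cases h : directives = []
  · simp [h]
  · simp only [h, if_false]
    rw [PySem.List.foldl_congr_mem (g := fun matched d =>
      if (pvGetD d "watches" []).any (pvRelevantB
            (PySem.Set.ofList (anomalies.map (fun a => pvGetD a "type" "")))
            (PySem.Set.ofList ((PySem.Set.ofList (anomalies.map (fun a => pvGetD a "type" ""))).flatMap pvPrefixes)))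
          then matched ++ [d] else matched)]
    · exact PySem.List.foldl_append_if_eq_filter _ _ _ |>.trans (by simp)
    · intro acc x _
      rw [watchLoopA_eq_any]
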